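-- pv_equiv track=rewrite | github.com/flyingduck0/ML_Seminar_Project | Data_pipeline_polymarket.py | categorize_market
-- ===== SOURCE A (Python) =====
-- def categorize_market(slug):
--     """
--     Applies the strict slug patterns to categorize the market.
--     Returns a tuple: (macro_pillar, sub_category) or (None, None) if no match.
--     """
--     if not isinstance(slug, str):
--         return None, None
--
--     slug = slug.lower().strip()
--
--     # --- 1. GDP GROWTH ---
--     if slug.startswith("us-gdp-growth-in-q"):
--         return "GDP_GROWTH", "GDP_QUARTERLY"
--     if slug.startswith("gdp-growth-in-20"):
--         return "GDP_GROWTH", "GDP_YEARLY"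
--
--     # --- 2. LABOR MARKET (UNEMPLOYMENT) ---
--     if "india" in slug or "indian" in slug:
--         pass # Explicit exclusion
--     elif "unemployment-rate" in slug:
--         if any(m in slug for m in MONTHS):
--             return "LABOR_MARKET", "UNEMPLOYMENT_MONTHLY"
--
--     # --- 3. INFLATION ---
--     if slug.startswith("how-high-will-inflation-get-in-"):
--         return "INFLATION", "INFLATION_YEAR_ANCHOR"
--     if "-inflation-annual" in slug or "-inflation-us-annual" in slug:
--         return "INFLATION", "INFLATION_MONTH_YOY"
--
--     # --- 4. FED POLICY ---
--     if "fed-interest-rates-" in slug or "fed-decision-in-" in slug: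
--         if any(m in slug for m in MONTHS):
--             return "FED_POLICY", "FED_MEETING_DECISION"
--
--     return None, None
--
-- MONTHS = ["january", "february", "march", "april", "may", "june",
--           "july", "august", "september", "october", "november", "december"]
-- ===== SOURCE B (Python) =====
-- MONTHS = ["january", "february", "march", "april", "may", "june",
--           "july", "august", "september", "october", "november", "december"]
--
--
-- def _pillar(s, has_month):
--     """Stage 1: decide the macro pillar only."""
--     if s.startswith("us-gdp-growth-in-q") or s.startswith("gdp-growth-in-20"):
--         return "GDP_GROWTH"
--     # 'indian' always contains 'india', so one exclusion test suffices
--     if has_month and "unemployment-rate" in s and "india" not in s: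
--         return "LABOR_MARKET"
--     if (s.startswith("how-high-will-inflation-get-in-")
--             or "-inflation-annual" in s or "-inflation-us-annual" in s):
--         return "INFLATION"
--     if has_month and ("fed-interest-rates-" in s or "fed-decision-in-" in s):
--         return "FED_POLICY"
--     return None
--
--
-- def _sub(pillar, s):
--     """Stage 2: refine the pillar into a sub-category."""
--     if pillar == "GDP_GROWTH":
--         return "GDP_QUARTERLY" if s.startswith("us-gdp-growth-in-q") else "GDP_YEARLY"
--     if pillar == "LABOR_MARKET":
--         return "UNEMPLOYMENT_MONTHLY"
--     if pillar == "INFLATION":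
--         return ("INFLATION_YEAR_ANCHOR"
--                 if s.startswith("how-high-will-inflation-get-in-")
--                 else "INFLATION_MONTH_YOY")
--     return "FED_MEETING_DECISION"
--
--
-- def categorize_market(slug):
--     """Hierarchical two-stage classifier: pillar first, then sub-category."""
--     if not isinstance(slug, str):
--         return None, None
--     s = slug.lower().strip()
--     has_month = any(m in s for m in MONTHS)
--     pillar = _pillar(s, has_month)
--     if pillar is None:
--         return None, None
--     return pillar, _sub(pillar, s)
-- ===== Notes on version B (the rewrite author's own statement) =====
-- stated objective: simpler
-- what changed: Replaces A's flat if-cascade by a hierarchical two-stage classifier (one function decides only the macro pillar, a second refines the pillar into its sub-category), hoists the month check into a precomputed flag and drops the redundant 'indian' test since 'indian' in s implies 'india' in s.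
import Mathlib
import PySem

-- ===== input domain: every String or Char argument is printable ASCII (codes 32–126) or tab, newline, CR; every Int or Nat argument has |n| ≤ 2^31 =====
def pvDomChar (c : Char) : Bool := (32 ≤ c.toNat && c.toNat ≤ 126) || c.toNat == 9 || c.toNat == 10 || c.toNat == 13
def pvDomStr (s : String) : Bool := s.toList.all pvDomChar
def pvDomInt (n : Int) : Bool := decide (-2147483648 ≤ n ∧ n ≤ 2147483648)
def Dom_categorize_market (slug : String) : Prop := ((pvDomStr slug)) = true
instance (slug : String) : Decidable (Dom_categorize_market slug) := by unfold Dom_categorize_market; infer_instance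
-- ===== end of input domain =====

-- B is a hierarchical two-stage classifier (pillar first, then sub-category), with the month
-- check hoisted and the redundant 'indian' test dropped (objective: simpler).

def pvMONTHS : List String :=
  ["january", "february", "march", "april", "may", "june",
   "july", "august", "september", "october", "november", "december"]

-- ===== PORT A =====
-- code after the labor-market section of A (sections 3 and 4 and the final return)
def pvTailA (s : String) : Option String × Option String :=
  if PySem.Str.startswith s "how-high-will-inflation-get-in-" then
    (some "INFLATION", some "INFLATION_YEAR_ANCHOR")
  else if PySem.Str.isIn "-inflation-annual" s || PySem.Str.isIn "-inflation-us-annual" s then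
    (some "INFLATION", some "INFLATION_MONTH_YOY")
  else if PySem.Str.isIn "fed-interest-rates-" s || PySem.Str.isIn "fed-decision-in-" s then
    if pvMONTHS.any (fun m => PySem.Str.isIn m s) then
      (some "FED_POLICY", some "FED_MEETING_DECISION")
    else (none, none)
  else (none, none)

-- body of A after the reassignment slug = slug.lower().strip()
def pvBodyA (s : String) : Option String × Option String :=
  if PySem.Str.startswith s "us-gdp-growth-in-q" then
    (some "GDP_GROWTH", some "GDP_QUARTERLY")
  else if PySem.Str.startswith s "gdp-growth-in-20" then
    (some "GDP_GROWTH", some "GDP_YEARLY")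
  else if PySem.Str.isIn "india" s || PySem.Str.isIn "indian" s then
    pvTailA s  -- pass: explicit exclusion, fall through
  else if PySem.Str.isIn "unemployment-rate" s then
    if pvMONTHS.any (fun m => PySem.Str.isIn m s) then
      (some "LABOR_MARKET", some "UNEMPLOYMENT_MONTHLY")
    else pvTailA s
  else pvTailA s

def categorize_market (slug : String) : Option String × Option String :=
  pvBodyA (PySem.Str.strip (PySem.Str.lower slug))

-- ===== PORT B =====
-- stage 1: the macro pillar only
def pvPillarB (s : String) (has_month : Bool) : Option String :=
  if PySem.Str.startswith s "us-gdp-growth-in-q" || PySem.Str.startswith s "gdp-growth-in-20" then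
    some "GDP_GROWTH"
  else if has_month && PySem.Str.isIn "unemployment-rate" s && !PySem.Str.isIn "india" s then
    some "LABOR_MARKET"
  else if PySem.Str.startswith s "how-high-will-inflation-get-in-"
      || PySem.Str.isIn "-inflation-annual" s || PySem.Str.isIn "-inflation-us-annual" s then
    some "INFLATION"
  else if has_month && (PySem.Str.isIn "fed-interest-rates-" s || PySem.Str.isIn "fed-decision-in-" s) then
    some "FED_POLICY"
  else none

-- stage 2: refine the pillar into a sub-category
def pvSubB (pillar : String) (s : String) : String :=
  if pillar = "GDP_GROWTH" then
    if PySem.Str.startswith s "us-gdp-growth-in-q" then "GDP_QUARTERLY" else "GDP_YEARLY"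
  else if pillar = "LABOR_MARKET" then "UNEMPLOYMENT_MONTHLY"
  else if pillar = "INFLATION" then
    if PySem.Str.startswith s "how-high-will-inflation-get-in-" then "INFLATION_YEAR_ANCHOR"
    else "INFLATION_MONTH_YOY"
  else "FED_MEETING_DECISION"

-- body of B after the reassignment; has_month is computed once and passed down
def pvBodyB (s : String) : Option String × Option String :=
  match pvPillarB s (pvMONTHS.any (fun m => PySem.Str.isIn m s)) with
  | none => (none, none)
  | some pillar => (some pillar, some (pvSubB pillar s))

def categorize_market_alt (slug : String) : Option String × Option String :=
  pvBodyB (PySem.Str.strip (PySem.Str.lower slug))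

-- ===== PRECONDITION & SPEC =====
def Spec_categorize_market (slug : String) (out : Option String × Option String) : Prop := out = categorize_market_alt slug
instance (slug : String) (out : Option String × Option String) : Decidable (Spec_categorize_market slug out) := by unfold Spec_categorize_market; infer_instance

-- ===== CLAIM (what is proved, stated in full; the proofs are below) =====
def Claim_equal_categorize_market : Prop := ∀ (slug : String), Dom_categorize_market slug → Spec_categorize_market slug (categorize_market slug)

-- ===== LEMMAS AND PROOFS =====
-- 'india' is a substring of 'indian', so 'indian' in s implies 'india' in s.
theorem pv_indian_india (s : String) (h : PySem.Str.isIn "indian" s = true) :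
    PySem.Str.isIn "india" s = true := by
  rw [PySem.Str.isIn_iff_infix] at h ⊢
  exact List.IsInfix.trans (by decide) h

-- ===== VERDICT (by name: the statement is the Claim_ definition above) =====
set_option maxHeartbeats 2000000 in
theorem categorize_market_spec : Claim_equal_categorize_market := by
  intro slug _
  unfold Spec_categorize_market categorize_market categorize_market_alt pvBodyA pvBodyB pvTailA pvPillarB pvSubB
  generalize PySem.Str.strip (PySem.Str.lower slug) = s
  have hii := pv_indian_india s
  generalize h3 : PySem.Str.isIn "india" s = b3 at hii
  generalize h4 : PySem.Str.isIn "indian" s = b4 at hii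
  generalize PySem.Str.startswith s "us-gdp-growth-in-q" = b1
  generalize PySem.Str.startswith s "gdp-growth-in-20" = b2
  generalize PySem.Str.isIn "unemployment-rate" s = b5
  generalize pvMONTHS.any (fun m => PySem.Str.isIn m s) = b6
  generalize PySem.Str.startswith s "how-high-will-inflation-get-in-" = b7
  generalize PySem.Str.isIn "-inflation-annual" s = b8
  generalize PySem.Str.isIn "-inflation-us-annual" s = b9
  generalize PySem.Str.isIn "fed-interest-rates-" s = b10
  generalize PySem.Str.isIn "fed-decision-in-" s = b11
  cases b3 with
  | true =>
      cases b4 <;> cases b1 <;> cases b2 <;> cases b5 <;> cases b6 <;> cases b7 <;> cases b8 <;> cases b9 <;>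
        cases b10 <;> cases b11 <;> rfl
  | false =>
      cases b4 with
      | true => exact absurd (hii rfl) (by decide)
      | false =>
          cases b1 <;> cases b2 <;> cases b5 <;> cases b6 <;> cases b7 <;> cases b8 <;>
            cases b9 <;> cases b10 <;> cases b11 <;> rfl
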